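-- pv_equiv track=rewrite | github.com/yandylsq/daletou | analyze_next_period_correlation.py | analyze_correlation
-- ===== SOURCE A (Python) =====
-- from collections import defaultdict
--
-- def get_zone_ratio(red):
--     """计算区间比（1-11, 12-23, 24-35）"""
--     z1 = sum(1 for x in red if 1 <= x <= 11)
--     z2 = sum(1 for x in red if 12 <= x <= 23)
--     z3 = sum(1 for x in red if 24 <= x <= 35)
--     return f"{z1}:{z2}:{z3}"
--
-- def get_odd_even_ratio(red):
--     """计算奇偶比"""
--     odd = sum(1 for x in red if x % 2 == 1)
--     even = 5 - odd
--     return f"{odd}:{even}"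
--
-- def get_size_ratio(red):
--     """计算大小比（1-17小，18-35大）"""
--     small = sum(1 for x in red if x <= 17)
--     big = 5 - small
--     return f"{small}:{big}"
--
-- def get_sum_range(red_sum):
--     """获取和值区间"""
--     if 40 <= red_sum <= 60:
--         return '40-60'
--     elif 61 <= red_sum <= 80:
--         return '61-80'
--     elif 81 <= red_sum <= 100:
--         return '81-100'
--     elif 101 <= red_sum <= 120:
--         return '101-120'
--     elif 121 <= red_sum <= 140:
--         return '121-140'
--     elif 141 <= red_sum <= 160:
--         return '141-160'
--     else:
--         return 'other'
--
-- def analyze_correlation(data):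
--     """分析上下期关联规律"""
--
--     # 统计结构：curr_feature -> next_feature -> count
--     sum_to_sum = defaultdict(lambda: defaultdict(int))
--     zone_to_zone = defaultdict(lambda: defaultdict(int))
--     odd_to_odd = defaultdict(lambda: defaultdict(int))
--     size_to_size = defaultdict(lambda: defaultdict(int))
--
--     # 统计区间比出现频率
--     zone_freq = defaultdict(int)
--
--     for i in range(len(data) - 1):
--         curr = data[i]
--         next_period = data[i + 1]
--
--         # 当前期特征
--         curr_sum = sum(curr['red'])
--         curr_sum_range = get_sum_range(curr_sum)
--         curr_zone = get_zone_ratio(curr['red'])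
--         curr_odd = get_odd_even_ratio(curr['red'])
--         curr_size = get_size_ratio(curr['red'])
--
--         # 下期特征
--         next_sum = sum(next_period['red'])
--         next_sum_range = get_sum_range(next_sum)
--         next_zone = get_zone_ratio(next_period['red'])
--         next_odd = get_odd_even_ratio(next_period['red'])
--         next_size = get_size_ratio(next_period['red'])
--
--         # 统计关联
--         sum_to_sum[curr_sum_range][next_sum_range] += 1
--         zone_to_zone[curr_zone][next_zone] += 1
--         odd_to_odd[curr_odd][next_odd] += 1
--         size_to_size[curr_size][next_size] += 1
--
--         # 统计区间比频率
--         zone_freq[curr_zone] += 1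
--
--     return sum_to_sum, zone_to_zone, odd_to_odd, size_to_size, zone_freq
-- ===== SOURCE B (Python) =====
-- from collections import defaultdict
--
-- def get_zone_ratio(red):
--     z1 = sum(1 for x in red if 1 <= x <= 11)
--     z2 = sum(1 for x in red if 12 <= x <= 23)
--     z3 = sum(1 for x in red if 24 <= x <= 35)
--     return f"{z1}:{z2}:{z3}"
--
-- def get_odd_even_ratio(red):
--     odd = sum(1 for x in red if x % 2 == 1)
--     return f"{odd}:{5 - odd}"
--
-- def get_size_ratio(red):
--     small = sum(1 for x in red if x <= 17)
--     return f"{small}:{5 - small}"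
--
-- def get_sum_range(red_sum):
--     if 40 <= red_sum <= 60:
--         return '40-60'
--     elif 61 <= red_sum <= 80:
--         return '61-80'
--     elif 81 <= red_sum <= 100:
--         return '81-100'
--     elif 101 <= red_sum <= 120:
--         return '101-120'
--     elif 121 <= red_sum <= 140:
--         return '121-140'
--     elif 141 <= red_sum <= 160:
--         return '141-160'
--     else:
--         return 'other'
--
-- def _features(period):
--     red = period['red']
--     return (get_sum_range(sum(red)), get_zone_ratio(red),
--             get_odd_even_ratio(red), get_size_ratio(red))
--
-- def _table(transitions):
--     """Group-by-and-count: for each distinct current feature (in first-occurrence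
--     order), collect the successor features and count each distinct successor."""
--     d = defaultdict(lambda: defaultdict(int))
--     for a in dict.fromkeys(c for c, _ in transitions):
--         nxts = [n for c, n in transitions if c == a]
--         inner = d[a]
--         for b in dict.fromkeys(nxts):
--             inner[b] = nxts.count(b)
--     return d
--
-- def analyze_correlation(data):
--     """Declarative restatement: compute each period's feature tuple once, then
--     build every transition table by grouping the (curr, next) feature pairs by
--     their current value and counting distinct successors, instead of a single
--     incremental pass bumping nested counters."""
--     if len(data) < 2:
--         return (defaultdict(lambda: defaultdict(int)), defaultdict(lambda: defaultdict(int)),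
--                 defaultdict(lambda: defaultdict(int)), defaultdict(lambda: defaultdict(int)),
--                 defaultdict(int))
--     feats = [_features(p) for p in data]
--     pairs = list(zip(feats, feats[1:]))
--     sum_to_sum = _table([(c[0], n[0]) for c, n in pairs])
--     zone_to_zone = _table([(c[1], n[1]) for c, n in pairs])
--     odd_to_odd = _table([(c[2], n[2]) for c, n in pairs])
--     size_to_size = _table([(c[3], n[3]) for c, n in pairs])
--     currs = [c[1] for c, _ in pairs]
--     zone_freq = defaultdict(int)
--     for z in dict.fromkeys(currs):
--         zone_freq[z] = currs.count(z)
--     return sum_to_sum, zone_to_zone, odd_to_odd, size_to_size, zone_freq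
-- ===== Notes on version B (the rewrite author's own statement) =====
-- stated objective: alternative
-- what changed: B replaces A's single incremental pass that bumps nested default counters with a declarative group-by-and-count: it computes each period's feature tuple once, then builds every transition table by iterating the distinct current features (dict.fromkeys order) and counting each distinct successor with list.count, and builds zone_freq the same way.
import Mathlib
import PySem

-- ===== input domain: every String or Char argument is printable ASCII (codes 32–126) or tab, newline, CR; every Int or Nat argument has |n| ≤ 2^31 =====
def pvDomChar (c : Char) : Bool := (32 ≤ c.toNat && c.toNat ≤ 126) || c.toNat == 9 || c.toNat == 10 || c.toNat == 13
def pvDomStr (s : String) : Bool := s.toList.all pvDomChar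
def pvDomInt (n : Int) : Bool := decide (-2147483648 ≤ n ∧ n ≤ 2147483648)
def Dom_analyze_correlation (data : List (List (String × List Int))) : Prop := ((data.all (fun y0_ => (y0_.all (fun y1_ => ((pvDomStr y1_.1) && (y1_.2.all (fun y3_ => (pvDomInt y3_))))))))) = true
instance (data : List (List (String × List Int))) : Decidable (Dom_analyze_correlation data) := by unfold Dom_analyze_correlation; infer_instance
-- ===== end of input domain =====

-- B builds every transition table declaratively by group-by-and-count (distinct current
-- features in first-occurrence order, then distinct successors with their counts),
-- instead of A's single incremental pass bumping nested default counters; same results,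
-- different algorithm (alternative decomposition, no speed claim).

-- ===== PORT A =====
-- shared module helpers (the Python module's get_* functions, used by both A and B)
def pv_get_zone_ratio (red : List Int) : String :=
  let z1 : Int := (red.countP (fun x => 1 ≤ x && x ≤ 11) : Nat)
  let z2 : Int := (red.countP (fun x => 12 ≤ x && x ≤ 23) : Nat)
  let z3 : Int := (red.countP (fun x => 24 ≤ x && x ≤ 35) : Nat)
  PySem.Int.toStr z1 ++ ":" ++ PySem.Int.toStr z2 ++ ":" ++ PySem.Int.toStr z3

def pv_get_odd_even_ratio (red : List Int) : String :=
  let odd : Int := (red.countP (fun x => PySem.Int.mod x 2 == 1) : Nat)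
  let even : Int := 5 - odd
  PySem.Int.toStr odd ++ ":" ++ PySem.Int.toStr even

def pv_get_size_ratio (red : List Int) : String :=
  let small : Int := (red.countP (fun x => x ≤ 17) : Nat)
  let big : Int := 5 - small
  PySem.Int.toStr small ++ ":" ++ PySem.Int.toStr big

def pv_get_sum_range (redSum : Int) : String :=
  if 40 ≤ redSum ∧ redSum ≤ 60 then "40-60"
  else if 61 ≤ redSum ∧ redSum ≤ 80 then "61-80"
  else if 81 ≤ redSum ∧ redSum ≤ 100 then "81-100"
  else if 101 ≤ redSum ∧ redSum ≤ 120 then "101-120"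
  else if 121 ≤ redSum ∧ redSum ≤ 140 then "121-140"
  else if 141 ≤ redSum ∧ redSum ≤ 160 then "141-160"
  else "other"

-- the running tables: four nested defaultdicts plus zone_freq
def PvSt : Type :=
  PySem.Dict String (PySem.Dict String Int) × PySem.Dict String (PySem.Dict String Int) ×
  PySem.Dict String (PySem.Dict String Int) × PySem.Dict String (PySem.Dict String Int) ×
  PySem.Dict String Int

-- turning the defaultdicts into the returned association lists (shared return step)
def pv_finish (st : PvSt) :
    (List (String × List (String × Int))) × (List (String × List (String × Int))) ×
    (List (String × List (String × Int))) × (List (String × List (String × Int))) ×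
    (List (String × Int)) :=
  match st with
  | (s2s, z2z, o2o, sz, zf) =>
    (s2s.items.map (fun p => (p.1, p.2.items)), z2z.items.map (fun p => (p.1, p.2.items)),
     o2o.items.map (fun p => (p.1, p.2.items)), sz.items.map (fun p => (p.1, p.2.items)),
     zf.items)

-- A's loop body on the two periods of iteration i ('d[k][k'] += 1' on a defaultdict is
-- 'modify k empty (modify k' 0 (+1))': a missing key is appended, exactly Python's order)
def pv_tally (st : PvSt) (curr next_period : List (String × List Int)) : PvSt :=
  let curr_red := (PySem.Dict.mk curr).getD "red" []
  let curr_sum := curr_red.sum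
  let curr_sum_range := pv_get_sum_range curr_sum
  let curr_zone := pv_get_zone_ratio curr_red
  let curr_odd := pv_get_odd_even_ratio curr_red
  let curr_size := pv_get_size_ratio curr_red
  let next_red := (PySem.Dict.mk next_period).getD "red" []
  let next_sum := next_red.sum
  let next_sum_range := pv_get_sum_range next_sum
  let next_zone := pv_get_zone_ratio next_red
  let next_odd := pv_get_odd_even_ratio next_red
  let next_size := pv_get_size_ratio next_red
  match st with
  | (s2s, z2z, o2o, sz, zf) =>
    (s2s.modify curr_sum_range PySem.Dict.empty (fun inn => inn.modify next_sum_range 0 (· + 1)),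
     z2z.modify curr_zone PySem.Dict.empty (fun inn => inn.modify next_zone 0 (· + 1)),
     o2o.modify curr_odd PySem.Dict.empty (fun inn => inn.modify next_odd 0 (· + 1)),
     sz.modify curr_size PySem.Dict.empty (fun inn => inn.modify next_size 0 (· + 1)),
     zf.modify curr_zone 0 (· + 1))

def analyze_correlation (data : List (List (String × List Int))) :
    (List (String × List (String × Int))) × (List (String × List (String × Int))) ×
    (List (String × List (String × Int))) × (List (String × List (String × Int))) ×
    (List (String × Int)) :=
  pv_finish
    ((PySem.List.pyRange 0 ((data.length : Int) - 1) 1).foldl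
      (fun st i => pv_tally st (PySem.List.pyGetD data i []) (PySem.List.pyGetD data (i + 1) []))
      (PySem.Dict.empty, PySem.Dict.empty, PySem.Dict.empty, PySem.Dict.empty, PySem.Dict.empty))

-- ===== PORT B =====
-- one period's feature tuple (sum range, zone ratio, odd/even ratio, size ratio)
def pv_features (p : List (String × List Int)) : String × String × String × String :=
  let red := (PySem.Dict.mk p).getD "red" []
  (pv_get_sum_range red.sum, pv_get_zone_ratio red, pv_get_odd_even_ratio red, pv_get_size_ratio red)

-- Source B's _table: group the (curr, next) pairs by distinct curr value (first-occurrence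
-- order, dict.fromkeys = PySem.List.dedup), then count each distinct successor
def pv_table (ps : List (String × String)) : PySem.Dict String (PySem.Dict String Int) :=
  (PySem.List.dedup (ps.map Prod.fst)).foldl
    (fun d a =>
      let nxts := (ps.filter (fun q => q.1 == a)).map Prod.snd
      d.modify a PySem.Dict.empty (fun inn =>
        (PySem.List.dedup nxts).foldl
          (fun inn b => inn.insert b ((nxts.count b : Nat) : Int)) inn))
    PySem.Dict.empty

-- Source B's zone_freq loop: distinct current zones with their counts
def pv_zone_freq (currs : List String) : PySem.Dict String Int :=
  (PySem.List.dedup currs).foldl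
    (fun d z => d.insert z ((currs.count z : Nat) : Int)) PySem.Dict.empty

def analyze_correlation_alt (data : List (List (String × List Int))) :
    (List (String × List (String × Int))) × (List (String × List (String × Int))) ×
    (List (String × List (String × Int))) × (List (String × List (String × Int))) ×
    (List (String × Int)) :=
  if data.length < 2 then
    pv_finish (PySem.Dict.empty, PySem.Dict.empty, PySem.Dict.empty, PySem.Dict.empty, PySem.Dict.empty)
  else
  let feats := data.map pv_features
  let pairs := feats.zip (PySem.List.slice feats (some 1) none)
  pv_finish
    (pv_table (pairs.map (fun cn => (cn.1.1, cn.2.1))),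
     pv_table (pairs.map (fun cn => (cn.1.2.1, cn.2.2.1))),
     pv_table (pairs.map (fun cn => (cn.1.2.2.1, cn.2.2.2.1))),
     pv_table (pairs.map (fun cn => (cn.1.2.2.2, cn.2.2.2.2))),
     pv_zone_freq (pairs.map (fun cn => cn.1.2.1)))

-- ===== PRECONDITION & SPEC =====
-- Pre_ excludes exactly the inputs where A raises KeyError: a period without a 'red' key,
-- reached whenever len(data) ≥ 2 (with fewer than two periods the loop body never runs).
def Pre_analyze_correlation (data : List (List (String × List Int))) : Prop :=
  data.length ≤ 1 ∨ ∀ p ∈ data, "red" ∈ p.map Prod.fst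
instance (data : List (List (String × List Int))) : Decidable (Pre_analyze_correlation data) := by
  unfold Pre_analyze_correlation; infer_instance

def pvWitness_analyze_correlation : (List (List (String × List Int))) :=
  [[("red", [1, 2, 3, 4, 5])], [("red", [11, 12, 24, 25, 35])]]

def Spec_analyze_correlation (data : List (List (String × List Int))) (out : (List (String × List (String × Int))) × (List (String × List (String × Int))) × (List (String × List (String × Int))) × (List (String × List (String × Int))) × (List (String × Int))) : Prop := out = analyze_correlation_alt data
instance (data : List (List (String × List Int))) (out : (List (String × List (String × Int))) × (List (String × List (String × Int))) × (List (String × List (String × Int))) × (List (String × List (String × Int))) × (List (String × Int))) : Decidable (Spec_analyze_correlation data out) := by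
  unfold Spec_analyze_correlation
  have h : DecidableEq (List (String × List (String × Int))) := by infer_instance
  exact instDecidableEqProd out (analyze_correlation_alt data)

-- ===== CLAIM (what is proved, stated in full; the proofs are below) =====
def Claim_equal_analyze_correlation : Prop := ∀ (data : List (List (String × List Int))), Dom_analyze_correlation data → Pre_analyze_correlation data → Spec_analyze_correlation data (analyze_correlation data)

-- ===== LEMMAS AND PROOFS =====

-- A fold over range(len(xs)-1) reading xs[i], xs[i+1] is a fold over consecutive pairs (Nat form)
theorem pv_fold_range_eq_zip {α St : Type} (g : St → α → α → St) (d : α) :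
    ∀ (xs : List α) (s : St),
    (List.range (xs.length - 1)).foldl (fun s k => g s (xs.getD k d) (xs.getD (k + 1) d)) s
    = (xs.zip (xs.drop 1)).foldl (fun s p => g s p.1 p.2) s
  | [], _ => rfl
  | [_], _ => rfl
  | x :: y :: t, s => by
    have IH := pv_fold_range_eq_zip g d (y :: t)
    simp only [List.length_cons, List.drop_succ_cons, List.drop_zero, List.zip_cons_cons,
      List.foldl_cons, Nat.add_sub_cancel, List.range_succ_eq_map, List.foldl_map,
      List.getD_cons_succ, List.getD_cons_zero] at *
    exact IH (g s x y)

-- the same, in A's pyRange/pyGetD form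
theorem pv_fold_pyRange_eq_zip {α St : Type} (g : St → α → α → St) (d : α)
    (xs : List α) (s : St) :
    (PySem.List.pyRange 0 ((xs.length : Int) - 1) 1).foldl
      (fun s i => g s (PySem.List.pyGetD xs i d) (PySem.List.pyGetD xs (i + 1) d)) s
    = (xs.zip (xs.drop 1)).foldl (fun s p => g s p.1 p.2) s := by
  rw [PySem.List.pyRange_one]
  have h1 : (((xs.length : Int) - 1) - 0).toNat = xs.length - 1 := by omega
  rw [h1, List.foldl_map]
  have h2 : (fun (s : St) (k : Nat) =>
        g s (PySem.List.pyGetD xs ((0 : Int) + ↑k) d) (PySem.List.pyGetD xs ((0 : Int) + ↑k + 1) d))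
      = fun s k => g s (xs.getD k d) (xs.getD (k + 1) d) := by
    funext s k
    have e1 : ((0 : Int) + (k : Int)) = ((k : Nat) : Int) := by omega
    rw [e1]
    rw [show ((k : Int) + 1) = (((k + 1 : Nat)) : Int) by push_cast; ring]
    rw [PySem.List.pyGetD_natCast, PySem.List.pyGetD_natCast]
  rw [h2]
  exact pv_fold_range_eq_zip g d xs s

-- A's loop body on raw periods is the loop body on their feature tuples
def pv_tally_pair (st : PvSt) (c n : String × String × String × String) : PvSt :=
  match st with
  | (s2s, z2z, o2o, sz, zf) =>
    (s2s.modify c.1 PySem.Dict.empty (fun inn => inn.modify n.1 0 (· + 1)),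
     z2z.modify c.2.1 PySem.Dict.empty (fun inn => inn.modify n.2.1 0 (· + 1)),
     o2o.modify c.2.2.1 PySem.Dict.empty (fun inn => inn.modify n.2.2.1 0 (· + 1)),
     sz.modify c.2.2.2 PySem.Dict.empty (fun inn => inn.modify n.2.2.2 0 (· + 1)),
     zf.modify c.2.1 0 (· + 1))

theorem pv_tally_eq_pair (st : PvSt) (c n : List (String × List Int)) :
    pv_tally st c n = pv_tally_pair st (pv_features c) (pv_features n) := rfl

-- A's single loop over five independent accumulators is five independent folds
theorem pv_tally_pair_split
    (ps : List ((String × String × String × String) × (String × String × String × String)))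
    (d1 d2 d3 d4 : PySem.Dict String (PySem.Dict String Int)) (zf : PySem.Dict String Int) :
    ps.foldl (fun st cn => pv_tally_pair st cn.1 cn.2) (d1, d2, d3, d4, zf)
    = (ps.foldl (fun d cn => d.modify cn.1.1 PySem.Dict.empty (fun inn => inn.modify cn.2.1 0 (· + 1))) d1,
       ps.foldl (fun d cn => d.modify cn.1.2.1 PySem.Dict.empty (fun inn => inn.modify cn.2.2.1 0 (· + 1))) d2,
       ps.foldl (fun d cn => d.modify cn.1.2.2.1 PySem.Dict.empty (fun inn => inn.modify cn.2.2.2.1 0 (· + 1))) d3,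
       ps.foldl (fun d cn => d.modify cn.1.2.2.2 PySem.Dict.empty (fun inn => inn.modify cn.2.2.2.2 0 (· + 1))) d4,
       ps.foldl (fun d cn => d.modify cn.1.2.1 0 (· + 1)) zf) := by
  induction ps generalizing d1 d2 d3 d4 zf with
  | nil => rfl
  | cons cn t ih =>
    simp only [List.foldl_cons]
    exact ih _ _ _ _ _

-- a loop of 'd[key(p)] = f(p, d.get(key(p), d0))' read back at one key c:
-- only the iterations whose key is c contribute, in order
theorem pv_getD_foldl_modify_key {κ ν β : Type} [BEq κ] [LawfulBEq κ]
    (l : List β) (key : β → κ) (d0 : ν) (f : β → ν → ν) :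
    ∀ (d : PySem.Dict κ ν) (c : κ),
    (l.foldl (fun d p => d.modify (key p) d0 (f p)) d).getD c d0
    = (l.filter (fun p => key p == c)).foldl (fun x p => f p x) (d.getD c d0)
  | d, c => by
    induction l generalizing d with
    | nil => rfl
    | cons p t ih =>
      simp only [List.foldl_cons, List.filter_cons]
      by_cases h : key p = c
      · subst h
        rw [if_pos (by simp), List.foldl_cons, ih (d.modify (key p) d0 (f p)),
          PySem.Dict.getD_modify_self]
      · have hb : (key p == c) = false := by simp [h]
        rw [hb]
        simp only [Bool.false_eq_true, if_false]
        rw [ih _]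
        rw [PySem.Dict.getD_modify_of_ne _ _ _ (fun hc => h hc.symm)]

-- Counter(xs) equals Source B's 'for k in dict.fromkeys(xs): d[k] = xs.count(k)' loop
theorem pv_counter_eq_dedup_insert {κ : Type} [BEq κ] [LawfulBEq κ] (xs : List κ) :
    PySem.Dict.counter xs
    = (PySem.List.dedup xs).foldl
        (fun d z => d.insert z ((xs.count z : Nat) : Int)) PySem.Dict.empty := by
  apply PySem.Dict.ext
  rw [PySem.Dict.items_counter]
  rw [PySem.Dict.items_foldl_insert_fresh (PySem.List.dedup xs) (fun z => z)
      (fun z => ((xs.count z : Nat) : Int)) PySem.Dict.empty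
      (by intro a _; simp [pysem]) (by simp)]
  rfl

-- Set.update from the empty set is Set.ofList
theorem pv_set_update_nil {α : Type} [BEq α] (xs : List α) :
    PySem.Set.update [] xs = PySem.Set.ofList xs := by
  rw [PySem.Set.ofList_eq_foldl]; rfl

-- two dicts with unique keys, the same key list and the same lookups are equal
theorem pv_dict_eq_of_keys_getD {κ ν : Type} [BEq κ] [LawfulBEq κ]
    (d1 d2 : PySem.Dict κ ν) (d0 : ν)
    (h1 : d1.keys.Nodup) (h2 : d2.keys.Nodup) (hk : d1.keys = d2.keys)
    (hg : ∀ c ∈ d1.keys, d1.getD c d0 = d2.getD c d0) : d1 = d2 := by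
  apply PySem.Dict.ext
  rw [PySem.Dict.items_eq_map_keys d1 h1 d0, PySem.Dict.items_eq_map_keys d2 h2 d0, ← hk]
  exact List.map_congr_left (fun a ha => by rw [hg a ha])

-- the incremental nested-counter loop equals Source B's group-by-and-count table
theorem pv_table_eq (ps : List (String × String)) :
    ps.foldl
      (fun d q => d.modify q.1 PySem.Dict.empty (fun inn => inn.modify q.2 0 (· + 1)))
      PySem.Dict.empty
    = pv_table ps := by
  have hd : PySem.List.dedup (ps.map Prod.fst) = PySem.Set.ofList (ps.map Prod.fst) := rfl
  have hkeysL :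
      (ps.foldl (fun d q => d.modify q.1 PySem.Dict.empty (fun inn => inn.modify q.2 (0 : Int) (· + 1)))
        PySem.Dict.empty).keys = PySem.Set.ofList (ps.map Prod.fst) := by
    rw [PySem.Dict.keys_foldl_modify_key ps Prod.fst PySem.Dict.empty
        (fun _ q inn => inn.modify q.2 0 (· + 1)) PySem.Dict.empty]
    rw [PySem.Dict.keys_empty, pv_set_update_nil]
  have hkeysR : (pv_table ps).keys = PySem.Set.ofList (ps.map Prod.fst) := by
    unfold pv_table
    rw [hd]
    rw [PySem.Dict.keys_foldl_modify_key (PySem.Set.ofList (ps.map Prod.fst)) (fun a => a)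
        PySem.Dict.empty
        (fun _ a inn =>
          (PySem.List.dedup ((ps.filter (fun q => q.1 == a)).map Prod.snd)).foldl
            (fun inn b => inn.insert b ((((ps.filter (fun q => q.1 == a)).map Prod.snd).count b : Nat) : Int)) inn)
        PySem.Dict.empty]
    rw [PySem.Dict.keys_empty]
    have hm : List.map (fun a => a) (PySem.Set.ofList (ps.map Prod.fst))
        = PySem.Set.ofList (ps.map Prod.fst) := List.map_id' _
    rw [hm, pv_set_update_nil]
    exact PySem.Set.ofList_ofList _
  have hgetL : ∀ c : String,
      (ps.foldl (fun d q => d.modify q.1 PySem.Dict.empty (fun inn => inn.modify q.2 (0 : Int) (· + 1)))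
        PySem.Dict.empty).getD c PySem.Dict.empty
      = PySem.Dict.counter ((ps.filter (fun q => q.1 == c)).map Prod.snd) := by
    intro c
    rw [pv_getD_foldl_modify_key ps Prod.fst PySem.Dict.empty
        (fun q inn => inn.modify q.2 0 (· + 1)) PySem.Dict.empty c]
    rw [PySem.Dict.getD_empty, PySem.Dict.counter_eq_foldl, List.foldl_map]
  have hgetR : ∀ c : String, c ∈ PySem.Set.ofList (ps.map Prod.fst) →
      (pv_table ps).getD c PySem.Dict.empty
      = PySem.Dict.counter ((ps.filter (fun q => q.1 == c)).map Prod.snd) := by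
    intro c hc
    unfold pv_table
    rw [hd]
    rw [pv_getD_foldl_modify_key (PySem.Set.ofList (ps.map Prod.fst)) (fun a => a)
        PySem.Dict.empty
        (fun a inn =>
          (PySem.List.dedup ((ps.filter (fun q => q.1 == a)).map Prod.snd)).foldl
            (fun inn b => inn.insert b ((((ps.filter (fun q => q.1 == a)).map Prod.snd).count b : Nat) : Int)) inn)
        PySem.Dict.empty c]
    have hfilter : (PySem.Set.ofList (ps.map Prod.fst)).filter (fun a => a == c) = [c] := by
      rw [List.filter_beq]
      rw [List.count_eq_one_of_mem (PySem.Set.nodup_ofList (ps.map Prod.fst)) hc]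
      rfl
    rw [hfilter]
    simp only [List.foldl_cons, List.foldl_nil, PySem.Dict.getD_empty]
    exact (pv_counter_eq_dedup_insert _).symm
  refine pv_dict_eq_of_keys_getD _ _ PySem.Dict.empty ?_ ?_ (hkeysL.trans hkeysR.symm) ?_
  · exact PySem.Dict.nodup_keys_foldl_modify_key ps Prod.fst PySem.Dict.empty
      (fun _ q inn => inn.modify q.2 0 (· + 1)) PySem.Dict.empty (by simp [pysem])
  · rw [hkeysR]
    exact PySem.Set.nodup_ofList _
  · intro c hc
    rw [hkeysL] at hc
    rw [hgetL c, hgetR c hc]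

-- the incremental zone_freq counter equals Source B's dedup-and-count loop
theorem pv_zone_freq_eq (currs : List String) :
    currs.foldl (fun d z => d.modify z 0 (· + 1)) PySem.Dict.empty = pv_zone_freq currs := by
  rw [← PySem.Dict.counter_eq_foldl]
  exact pv_counter_eq_dedup_insert currs

-- ===== VERDICT (by name: the statement is the Claim_ definition above) =====
theorem analyze_correlation_spec : Claim_equal_analyze_correlation := by
  intro data _ _
  unfold Spec_analyze_correlation
  simp only [analyze_correlation, analyze_correlation_alt]
  by_cases h : data.length < 2
  · rw [if_pos h, PySem.List.pyRange_one_eq_nil (by omega)]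
    rfl
  rw [if_neg h]
  have hslice : PySem.List.slice (data.map pv_features) (some 1) none
      = (data.map pv_features).drop 1 := by simp [pysem]
  rw [hslice]
  rw [pv_fold_pyRange_eq_zip pv_tally [] data]
  have hstep : (data.zip (data.drop 1)).foldl (fun s p => pv_tally s p.1 p.2)
        (PySem.Dict.empty, PySem.Dict.empty, PySem.Dict.empty, PySem.Dict.empty, PySem.Dict.empty)
      = ((data.map pv_features).zip ((data.map pv_features).drop 1)).foldl
        (fun st cn => pv_tally_pair st cn.1 cn.2)
        (PySem.Dict.empty, PySem.Dict.empty, PySem.Dict.empty, PySem.Dict.empty, PySem.Dict.empty) := by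
    rw [← List.map_drop, List.zip_map, List.foldl_map]
    apply PySem.List.foldl_congr_mem
    intro acc x _
    exact pv_tally_eq_pair acc x.1 x.2
  rw [hstep]
  rw [pv_tally_pair_split]
  unfold pv_finish
  have hc1 := pv_table_eq (((data.map pv_features).zip ((data.map pv_features).drop 1)).map
    (fun cn => (cn.1.1, cn.2.1)))
  have hc2 := pv_table_eq (((data.map pv_features).zip ((data.map pv_features).drop 1)).map
    (fun cn => (cn.1.2.1, cn.2.2.1)))
  have hc3 := pv_table_eq (((data.map pv_features).zip ((data.map pv_features).drop 1)).map
    (fun cn => (cn.1.2.2.1, cn.2.2.2.1)))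
  have hc4 := pv_table_eq (((data.map pv_features).zip ((data.map pv_features).drop 1)).map
    (fun cn => (cn.1.2.2.2, cn.2.2.2.2)))
  have hc5 := pv_zone_freq_eq (((data.map pv_features).zip ((data.map pv_features).drop 1)).map
    (fun cn => cn.1.2.1))
  rw [List.foldl_map] at hc1 hc2 hc3 hc4 hc5
  rw [hc1, hc2, hc3, hc4, hc5]
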